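-- pv_equiv track=rewrite | github.com/WilliamBonvini/sydraw | sydraw/utils/utils.py | compute_num_inliers_per_model
-- ===== SOURCE A (Python) =====
-- from math import floor
-- from typing import List
--
-- def compute_num_inliers_per_model(
--     tot_num_inliers: int, num_of_models: int
-- ) -> List[int]:
--     """
--
--     :param tot_num_inliers: total number of inliers in the whole sample
--     :param num_of_models: the number of models to be drawn in each sample
--     :return: a list that contains the number of inlier points for each model
--     """
--     n_inliers = []
--     remaining = tot_num_inliers
--     remaining_n_of_models = num_of_models
--     while remaining_n_of_models > 0:
--         cur_model_n_nliers = floor(remaining / remaining_n_of_models)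
--         n_inliers.append(cur_model_n_nliers)
--         remaining -= cur_model_n_nliers
--         remaining_n_of_models -= 1
--     return n_inliers
-- ===== SOURCE B (Python) =====
-- def compute_num_inliers_per_model(tot_num_inliers, num_of_models):
--     if num_of_models <= 0:
--         return []
--     q, r = divmod(tot_num_inliers, num_of_models)
--     return [q] * (num_of_models - r) + [q + 1] * r
-- ===== Notes on version B (the rewrite author's own statement) =====
-- stated objective: faster
-- what changed: Replaces the per-model remainder-rebalancing while-loop (one floor division per model) with a single divmod and two list replications [q]*(n-r)+[q+1]*r.
import Mathlib
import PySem

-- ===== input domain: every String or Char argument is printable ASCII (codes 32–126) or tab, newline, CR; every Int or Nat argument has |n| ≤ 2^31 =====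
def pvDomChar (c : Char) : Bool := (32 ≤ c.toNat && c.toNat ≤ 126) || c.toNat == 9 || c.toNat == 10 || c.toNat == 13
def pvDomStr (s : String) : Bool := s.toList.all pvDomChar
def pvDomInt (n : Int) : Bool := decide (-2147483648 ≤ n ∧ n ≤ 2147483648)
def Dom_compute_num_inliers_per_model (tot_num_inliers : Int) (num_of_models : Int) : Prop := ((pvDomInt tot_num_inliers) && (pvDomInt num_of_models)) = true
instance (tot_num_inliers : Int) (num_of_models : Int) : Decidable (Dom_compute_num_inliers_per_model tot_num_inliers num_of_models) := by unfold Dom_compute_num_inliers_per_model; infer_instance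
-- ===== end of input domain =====

-- B replaces A's per-model floor-division loop with one divmod and two list replications (constant-factor faster).

-- ===== PORT A =====
-- the while-loop of A: floor(remaining / remaining_n_of_models) is ported as PySem.Int.floordiv,
-- exact here: under Dom's |n| ≤ 2^31 bound, math.floor of the float quotient equals floor division
def pvLoopA (remaining : Int) (remaining_n_of_models : Int) : List Int :=
  if h : remaining_n_of_models > 0 then
    let cur := PySem.Int.floordiv remaining remaining_n_of_models
    cur :: pvLoopA (remaining - cur) (remaining_n_of_models - 1)
  else []
termination_by remaining_n_of_models.toNat
decreasing_by omega

def compute_num_inliers_per_model (tot_num_inliers : Int) (num_of_models : Int) : List Int :=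
  pvLoopA tot_num_inliers num_of_models

-- ===== PORT B =====
def compute_num_inliers_per_model_alt (tot_num_inliers : Int) (num_of_models : Int) : List Int :=
  if num_of_models ≤ 0 then []
  else
    let q := PySem.Int.floordiv tot_num_inliers num_of_models
    let r := PySem.Int.mod tot_num_inliers num_of_models
    List.replicate (num_of_models - r).toNat q ++ List.replicate r.toNat (q + 1)

-- ===== PRECONDITION & SPEC =====
def Spec_compute_num_inliers_per_model (tot_num_inliers : Int) (num_of_models : Int) (out : List Int) : Prop := out = compute_num_inliers_per_model_alt tot_num_inliers num_of_models
instance (tot_num_inliers : Int) (num_of_models : Int) (out : List Int) : Decidable (Spec_compute_num_inliers_per_model tot_num_inliers num_of_models out) := by unfold Spec_compute_num_inliers_per_model; infer_instance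

-- ===== CLAIM (what is proved, stated in full; the proofs are below) =====
def Claim_equal_compute_num_inliers_per_model : Prop := ∀ (tot_num_inliers : Int) (num_of_models : Int), Dom_compute_num_inliers_per_model tot_num_inliers num_of_models → Spec_compute_num_inliers_per_model tot_num_inliers num_of_models (compute_num_inliers_per_model tot_num_inliers num_of_models)

-- ===== LEMMAS AND PROOFS =====

theorem pvLoopA_pos (t k : Int) (h : 0 < k) :
    pvLoopA t k = PySem.Int.floordiv t k :: pvLoopA (t - PySem.Int.floordiv t k) (k - 1) := by
  rw [pvLoopA]; simp [h]

theorem pvLoopA_nonpos (t k : Int) (h : ¬ k > 0) : pvLoopA t k = [] := by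
  rw [pvLoopA]; simp [h]

-- uniqueness of floor quotient/remainder for positive divisor
theorem pv_fdiv_fmod_unique (t k q r : Int) (hk : 0 < k) (heq : t = k * q + r)
    (hr0 : 0 ≤ r) (hrk : r < k) :
    PySem.Int.floordiv t k = q ∧ PySem.Int.mod t k = r := by
  have hd : PySem.Int.floordiv t k = q := by
    rw [PySem.Int.floordiv_eq_iff_of_pos hk]
    constructor <;> nlinarith
  refine ⟨hd, ?_⟩
  have := PySem.Int.floordiv_mul_add_mod t k
  rw [hd] at this
  nlinarith

-- A's loop, characterised: for k > 0 it yields (k - r) copies of q then r copies of (q+1)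
theorem pvLoopA_eq (n : Nat) : ∀ (t : Int),
    pvLoopA t ((n : Int) + 1) =
      List.replicate (((n : Int) + 1 - PySem.Int.mod t ((n : Int) + 1)).toNat)
          (PySem.Int.floordiv t ((n : Int) + 1)) ++
        List.replicate ((PySem.Int.mod t ((n : Int) + 1)).toNat)
          (PySem.Int.floordiv t ((n : Int) + 1) + 1) := by
  induction n with
  | zero =>
    intro t
    have h1 : PySem.Int.floordiv t 1 = t ∧ PySem.Int.mod t 1 = 0 :=
      pv_fdiv_fmod_unique t 1 t 0 (by omega) (by ring) (by omega) (by omega)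
    have hc : ((0 : Nat) : Int) + 1 = 1 := by norm_num
    rw [hc, pvLoopA_pos t 1 (by omega), pvLoopA_nonpos _ _ (by omega)]
    simp [h1.1, h1.2]
  | succ m ih =>
    intro t
    set k : Int := (m : Int) + 1 + 1 with hk
    have hkpos : 0 < k := by omega
    set q := PySem.Int.floordiv t k with hq
    set r := PySem.Int.mod t k with hr
    have hsum : q * k + r = t := PySem.Int.floordiv_mul_add_mod t k
    have hr0 : 0 ≤ r := by
      have := PySem.Int.mod_eq_emod_of_pos (a := t) hkpos
      rw [← hr] at this; rw [this]; exact Int.emod_nonneg t (by omega)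
    have hrk : r < k := by
      have := PySem.Int.mod_eq_emod_of_pos (a := t) hkpos
      rw [← hr] at this; rw [this]; exact Int.emod_lt_of_pos t hkpos
    have hcast : ((m + 1 : Nat) : Int) + 1 = k := by push_cast [hk]; ring
    rw [hcast, pvLoopA_pos t k hkpos, ← hq, ← hr]
    have hk1 : k - 1 = (m : Int) + 1 := by omega
    rw [hk1]
    by_cases hcase : r < k - 1
    · -- remainder untouched this step: next quotient is still q, remainder still r
      have hnext : PySem.Int.floordiv (t - q) ((m : Int) + 1) = q ∧
          PySem.Int.mod (t - q) ((m : Int) + 1) = r :=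
        pv_fdiv_fmod_unique _ _ q r (by omega) (by nlinarith) hr0 (by omega)
      rw [ih (t - q), hnext.1, hnext.2]
      have : (k - r).toNat = ((m : Int) + 1 - r).toNat + 1 := by omega
      rw [this, List.replicate_succ]
      simp
    · -- r = k - 1: the one short chunk is emitted now, the rest all get q+1
      have hreq : r = k - 1 := by omega
      have hnext : PySem.Int.floordiv (t - q) ((m : Int) + 1) = q + 1 ∧
          PySem.Int.mod (t - q) ((m : Int) + 1) = 0 :=
        pv_fdiv_fmod_unique _ _ (q + 1) 0 (by omega) (by nlinarith) (by omega) (by omega)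
      rw [ih (t - q), hnext.1, hnext.2]
      have h1 : (k - r).toNat = 1 := by omega
      have h2 : ((m : Int) + 1 - 0).toNat = r.toNat := by omega
      rw [h1, h2]
      simp

-- ===== VERDICT (by name: the statement is the Claim_ definition above) =====
theorem compute_num_inliers_per_model_spec : Claim_equal_compute_num_inliers_per_model := by
  intro t n _
  unfold Spec_compute_num_inliers_per_model compute_num_inliers_per_model compute_num_inliers_per_model_alt
  by_cases hn : n ≤ 0
  · rw [pvLoopA_nonpos _ _ (by omega), if_pos hn]
  · have hpos : 0 < n := by omega
    obtain ⟨m, hm⟩ : ∃ m : Nat, n = (m : Int) + 1 := ⟨(n - 1).toNat, by omega⟩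
    subst hm
    rw [pvLoopA_eq m t, if_neg hn]
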